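-- pv_equiv track=rewrite | github.com/GEMTechnologies/GRAIVE | graive.py | _generate_default_section_content
-- ===== SOURCE A (Python) =====
-- from typing import Dict, List, Any, Optional, TYPE_CHECKING
--
-- def _generate_default_section_content(
--
--     section_title: str,
--     key_points: List[str],
--     word_count: int,
--     topic: str
-- ) -> str:
--     """Fallback content when LLM generation is unavailable."""
--
--     paragraphs = []
--     base_sentence_count = max(3, word_count // 120)
--     key_points = key_points or [f"Core aspect of {topic}"]
--
--     for point in key_points:
--         paragraph = (
--             f"{section_title} explores {point} within the broader context of {topic}. "
--             f"This section examines historical background, current developments, and emerging perspectives related to {point}."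
--         )
--         if len(paragraph.split()) < base_sentence_count * 20:
--             paragraph += (
--                 f" Furthermore, it highlights practical implications and provides examples that demonstrate why {point} "
--                 "matters for researchers and practitioners alike."
--             )
--         paragraphs.append(paragraph)
--
--     while len("\n\n".join(paragraphs).split()) < word_count:
--         paragraphs.append(
--             f"Building upon these insights, the section emphasises the importance of {section_title.lower()} for understanding "
--             f"the evolving narrative around {topic}."
--         )
--
--     return "\n\n".join(paragraphs)
-- ===== SOURCE B (Python) =====
-- def _generate_default_section_content(
--     section_title,
--     key_points,
--     word_count,
--     topic
-- ):
--     """Fallback content; pads with fillers computed in closed form instead of re-joining/splitting."""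
--     base_sentence_count = max(3, word_count // 120)
--     points = key_points or [f"Core aspect of {topic}"]
--
--     paragraphs = []
--     total_words = 0
--     for point in points:
--         paragraph = (
--             f"{section_title} explores {point} within the broader context of {topic}. "
--             f"This section examines historical background, current developments, and emerging perspectives related to {point}."
--         )
--         if len(paragraph.split()) < base_sentence_count * 20:
--             paragraph += (
--                 f" Furthermore, it highlights practical implications and provides examples that demonstrate why {point} "
--                 "matters for researchers and practitioners alike."
--             )
--         paragraphs.append(paragraph)
--         total_words += len(paragraph.split())
--
--     if total_words < word_count:
--         filler = (
--             f"Building upon these insights, the section emphasises the importance of {section_title.lower()} for understanding "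
--             f"the evolving narrative around {topic}."
--         )
--         filler_words = len(filler.split())
--         paragraphs.extend([filler] * -((total_words - word_count) // filler_words))
--
--     return "\n\n".join(paragraphs)
-- ===== Notes on version B (the rewrite author's own statement) =====
-- stated objective: alternative
-- what changed: Replaces A's while loop that re-joins and re-splits all paragraphs on every iteration with a running word count kept during the first pass and a closed-form ceiling division that computes the number of filler paragraphs at once.
import Mathlib
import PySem

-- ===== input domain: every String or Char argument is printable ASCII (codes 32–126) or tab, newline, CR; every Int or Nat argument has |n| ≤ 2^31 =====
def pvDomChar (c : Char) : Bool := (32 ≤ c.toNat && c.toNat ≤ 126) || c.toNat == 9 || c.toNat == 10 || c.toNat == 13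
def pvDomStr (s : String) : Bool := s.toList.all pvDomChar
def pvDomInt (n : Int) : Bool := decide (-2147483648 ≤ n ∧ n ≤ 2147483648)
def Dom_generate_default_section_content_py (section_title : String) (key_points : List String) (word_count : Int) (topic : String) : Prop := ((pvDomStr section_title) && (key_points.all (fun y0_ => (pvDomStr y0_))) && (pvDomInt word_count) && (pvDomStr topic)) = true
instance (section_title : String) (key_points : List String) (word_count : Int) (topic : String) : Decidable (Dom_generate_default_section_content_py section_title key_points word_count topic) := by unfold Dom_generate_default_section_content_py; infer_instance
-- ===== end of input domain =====

-- B replaces A's while loop, which re-joins and re-splits ALL paragraphs on every iteration, by a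
-- running word count kept in the first pass and one ceiling division giving the filler count at once.

-- ===== PORT A =====
-- text builders shared by both ports (the literal f-string pieces of the Python source)
def pvPara (st tp point : List Char) : List Char :=
  st ++ " explores ".toList ++ point ++ " within the broader context of ".toList ++ tp
    ++ ". This section examines historical background, current developments, and emerging perspectives related to ".toList
    ++ point ++ ".".toList

def pvExtra (point : List Char) : List Char :=
  " Furthermore, it highlights practical implications and provides examples that demonstrate why ".toList
    ++ point ++ " matters for researchers and practitioners alike.".toList

def pvFiller (st tp : List Char) : List Char :=
  "Building upon these insights, the section emphasises the importance of ".toList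
    ++ PySem.Chars.lower st ++ " for understanding the evolving narrative around ".toList ++ tp ++ ".".toList

def pvNN : List Char := ['\n', '\n']

-- word count of "\n\n".join(ps).split()
def pvCountWords (ps : List (List Char)) : Nat := (PySem.Chars.split₀ (PySem.Chars.join pvNN ps)).length

-- the next five lemmas are needed by pvFillLoop's termination proof, which cites them by name
theorem pv_go_acc (s : List Char) : ∀ (cur : List Char) (acc : List (List Char)),
    PySem.Chars.split₀.go s cur acc = acc.reverse ++ PySem.Chars.split₀.go s cur [] := by
  induction s with
  | nil =>
    intro cur acc
    simp only [PySem.Chars.split₀.go]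
    split <;> simp
  | cons c rest ih =>
    intro cur acc
    simp only [PySem.Chars.split₀.go]
    by_cases hc : PySem.Chars.isspace c = true
    · simp only [hc, if_true]
      by_cases hcur : cur.isEmpty
      · simp only [hcur, if_true]
        exact ih [] acc
      · simp only [hcur, Bool.false_eq_true, if_false]
        rw [ih [] (cur.reverse :: acc), ih [] [cur.reverse]]
        simp
    · simp only [hc, Bool.false_eq_true, if_false]
      exact ih (c :: cur) acc

theorem pv_go_len_ge (s : List Char) : ∀ (cur : List Char) (acc : List (List Char)),
    acc.length + (if cur.isEmpty then 0 else 1) ≤ (PySem.Chars.split₀.go s cur acc).length := by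
  induction s with
  | nil =>
    intro cur acc
    simp only [PySem.Chars.split₀.go]
    by_cases hcur : cur.isEmpty <;> simp [hcur]
  | cons c rest ih =>
    intro cur acc
    simp only [PySem.Chars.split₀.go]
    by_cases hc : PySem.Chars.isspace c = true
    · simp only [hc, if_true]
      by_cases hcur : cur.isEmpty
      · simp only [hcur, if_true]
        have := ih [] acc
        simpa using this
      · simp only [hcur, Bool.false_eq_true, if_false]
        have := ih [] (cur.reverse :: acc)
        simp only [List.isEmpty_nil, if_true, List.length_cons] at this
        omega
    · simp only [hc, Bool.false_eq_true, if_false]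
      have := ih (c :: cur) acc
      simp only [List.isEmpty_cons, Bool.false_eq_true, if_false] at this
      by_cases hcur : cur.isEmpty <;> simp [hcur] <;> omega

theorem pv_split_pos (s : List Char) (hx : ∃ x ∈ s, PySem.Chars.isspace x = false) :
    0 < (PySem.Chars.split₀ s).length := by
  unfold PySem.Chars.split₀
  induction s with
  | nil => simp at hx
  | cons c rest ih =>
    simp only [PySem.Chars.split₀.go]
    by_cases hc : PySem.Chars.isspace c = true
    · simp only [hc, if_true, List.isEmpty_nil, if_true]
      apply ih
      rcases hx with ⟨x, hm, hns⟩
      rcases List.mem_cons.mp hm with h | h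
      · subst h; rw [hc] at hns; simp at hns
      · exact ⟨x, h, hns⟩
    · simp only [hc, Bool.false_eq_true, if_false]
      have := pv_go_len_ge rest [c] []
      simp only [List.isEmpty_cons, Bool.false_eq_true, if_false, List.length_nil] at this
      omega

theorem pv_split_append_space_go {c : Char} (hc : PySem.Chars.isspace c = true) (b : List Char) :
    ∀ (a cur : List Char) (acc : List (List Char)),
    PySem.Chars.split₀.go (a ++ c :: b) cur acc
      = acc.reverse ++ PySem.Chars.split₀.go a cur [] ++ PySem.Chars.split₀.go b [] [] := by
  intro a
  induction a with
  | nil =>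
    intro cur acc
    simp only [List.nil_append, PySem.Chars.split₀.go, hc, if_true]
    by_cases hcur : cur.isEmpty
    · simp only [hcur, if_true]
      rw [pv_go_acc b [] acc]
      simp
    · simp only [hcur, Bool.false_eq_true, if_false]
      rw [pv_go_acc b [] (cur.reverse :: acc)]
      simp
  | cons x a' ih =>
    intro cur acc
    simp only [List.cons_append, PySem.Chars.split₀.go]
    by_cases hx : PySem.Chars.isspace x = true
    · simp only [hx, if_true]
      by_cases hcur : cur.isEmpty
      · simp only [hcur, if_true]
        rw [ih [] acc]
      · simp only [hcur, Bool.false_eq_true, if_false]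
        rw [ih [] (cur.reverse :: acc), pv_go_acc a' [] [cur.reverse]]
        simp
    · simp only [hx, Bool.false_eq_true, if_false]
      rw [ih (x :: cur) acc]

theorem pv_split_append_space {c : Char} (hc : PySem.Chars.isspace c = true) (a b : List Char) :
    PySem.Chars.split₀ (a ++ c :: b) = PySem.Chars.split₀ a ++ PySem.Chars.split₀ b := by
  unfold PySem.Chars.split₀
  rw [pv_split_append_space_go hc b a [] []]
  simp

theorem pv_split_nn (a b : List Char) :
    PySem.Chars.split₀ (a ++ '\n' :: '\n' :: b) = PySem.Chars.split₀ a ++ PySem.Chars.split₀ b := by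
  rw [pv_split_append_space (by decide) a ('\n' :: b),
      show ('\n' :: b) = [] ++ '\n' :: b from rfl,
      pv_split_append_space (by decide) [] b]
  rfl

theorem pv_join_append (ps : List (List Char)) (q : List Char) (h : ps ≠ []) :
    PySem.Chars.join pvNN (ps ++ [q]) = PySem.Chars.join pvNN ps ++ '\n' :: '\n' :: q := by
  induction ps with
  | nil => simp at h
  | cons p rest ih =>
    by_cases hr : rest = []
    · subst hr
      simp [PySem.Chars.join, List.intercalate, pvNN]
    · have := ih hr
      simp only [PySem.Chars.join, List.intercalate] at *
      rcases rest with _ | ⟨r, rest'⟩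
      · simp at hr
      · simp_all [List.intersperse]

theorem pv_countWords_append (ps : List (List Char)) (q : List Char) :
    pvCountWords (ps ++ [q]) = pvCountWords ps + (PySem.Chars.split₀ q).length := by
  by_cases h : ps = []
  · subst h
    simp [pvCountWords, PySem.Chars.join, List.intercalate]
    rfl
  · unfold pvCountWords
    rw [pv_join_append ps q h, pv_split_nn]
    simp

theorem pv_filler_pos (st tp : List Char) : 0 < (PySem.Chars.split₀ (pvFiller st tp)).length := by
  apply pv_split_pos
  refine ⟨'B', ?_, by decide⟩
  simp only [pvFiller, List.mem_append]
  left; left; left; left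
  decide

-- A's while loop: keeps appending the filler while the re-joined, re-split text is short
def pvFillLoop (wc : Int) (st tp : List Char) (ps : List (List Char)) : List (List Char) :=
  if (pvCountWords ps : Int) < wc then
    pvFillLoop wc st tp (ps ++ [pvFiller st tp])
  else ps
termination_by (wc - pvCountWords ps).toNat
decreasing_by
  have h1 := pv_countWords_append ps (pvFiller st tp)
  have h2 := pv_filler_pos st tp
  omega

def generate_default_section_content_py (section_title : String) (key_points : List String) (word_count : Int) (topic : String) : String :=
  let st := section_title.toList
  let tp := topic.toList
  let base := max 3 (PySem.Int.floordiv word_count 120)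
  let points := if key_points.isEmpty then ["Core aspect of ".toList ++ tp] else key_points.map String.toList
  let paragraphs := points.foldl (fun ps point =>
    let p := pvPara st tp point
    let p := if ((PySem.Chars.split₀ p).length : Int) < base * 20 then p ++ pvExtra point else p
    ps ++ [p]) []
  String.ofList (PySem.Chars.join pvNN (pvFillLoop word_count st tp paragraphs))

-- ===== PORT B =====
def generate_default_section_content_py_alt (section_title : String) (key_points : List String) (word_count : Int) (topic : String) : String :=
  let st := section_title.toList
  let tp := topic.toList
  let base := max 3 (PySem.Int.floordiv word_count 120)
  let points := if key_points.isEmpty then ["Core aspect of ".toList ++ tp] else key_points.map String.toList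
  let acc := points.foldl (fun (acc : List (List Char) × Int) point =>
    let p := pvPara st tp point
    let p := if ((PySem.Chars.split₀ p).length : Int) < base * 20 then p ++ pvExtra point else p
    (acc.1 ++ [p], acc.2 + ((PySem.Chars.split₀ p).length : Int))) ([], 0)
  let paragraphs :=
    if acc.2 < word_count then
      let filler := pvFiller st tp
      let fw := ((PySem.Chars.split₀ filler).length : Int)
      acc.1 ++ List.replicate (-(PySem.Int.floordiv (acc.2 - word_count) fw)).toNat filler
    else acc.1
  String.ofList (PySem.Chars.join pvNN paragraphs)

-- ===== PRECONDITION & SPEC =====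
def Spec_generate_default_section_content_py (section_title : String) (key_points : List String) (word_count : Int) (topic : String) (out : String) : Prop := out = generate_default_section_content_py_alt section_title key_points word_count topic
instance (section_title : String) (key_points : List String) (word_count : Int) (topic : String) (out : String) : Decidable (Spec_generate_default_section_content_py section_title key_points word_count topic out) := by unfold Spec_generate_default_section_content_py; infer_instance

-- ===== CLAIM (what is proved, stated in full; the proofs are below) =====
def Claim_equal_generate_default_section_content_py : Prop := ∀ (section_title : String) (key_points : List String) (word_count : Int) (topic : String), Dom_generate_default_section_content_py section_title key_points word_count topic → Spec_generate_default_section_content_py section_title key_points word_count topic (generate_default_section_content_py section_title key_points word_count topic)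

-- ===== LEMMAS AND PROOFS =====

-- floor division shifts by one when the (positive) divisor is subtracted from the dividend
theorem pv_floordiv_sub_self {a b : Int} (hb : 0 < b) :
    PySem.Int.floordiv (a - b) b = PySem.Int.floordiv a b - 1 := by
  have h := (PySem.Int.floordiv_eq_iff_of_pos hb (q := PySem.Int.floordiv a b)).mp rfl
  refine (PySem.Int.floordiv_eq_iff_of_pos hb).mpr ⟨?_, ?_⟩ <;> nlinarith [h.1, h.2]

-- B's pair fold is A's list fold together with the running word count
theorem pv_fold_pair (g : List Char → List Char) (points : List (List Char)) :
    ∀ (ps : List (List Char)) (t : Int),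
    points.foldl (fun acc point => (acc.1 ++ [g point], acc.2 + ((PySem.Chars.split₀ (g point)).length : Int))) (ps, t)
    = (points.foldl (fun ps point => ps ++ [g point]) ps,
       t - (pvCountWords ps : Int) + (pvCountWords (points.foldl (fun ps point => ps ++ [g point]) ps) : Int)) := by
  induction points with
  | nil => intro ps t; simp
  | cons p rest ih =>
    intro ps t
    simp only [List.foldl_cons]
    rw [ih (ps ++ [g p]) (t + ((PySem.Chars.split₀ (g p)).length : Int))]
    have := pv_countWords_append ps (g p)
    congr 1
    push_cast [this]
    ring

-- closed form of A's while loop: it appends exactly ceil((wc - words)/filler_words) fillers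
theorem pv_fillLoop_eq (wc : Int) (st tp : List Char) (ps : List (List Char)) :
    pvFillLoop wc st tp ps =
      if (pvCountWords ps : Int) < wc then
        ps ++ List.replicate (-(PySem.Int.floordiv ((pvCountWords ps : Int) - wc) ((PySem.Chars.split₀ (pvFiller st tp)).length : Int))).toNat (pvFiller st tp)
      else ps := by
  induction ps using pvFillLoop.induct wc st tp with
  | case2 ps h =>
    rw [pvFillLoop]
    simp [h]
  | case1 ps h ih =>
    rw [pvFillLoop]
    simp only [h, if_true]
    rw [ih]
    set fw : Int := ((PySem.Chars.split₀ (pvFiller st tp)).length : Int) with hfw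
    have hfwpos : 0 < fw := by rw [hfw]; exact_mod_cast pv_filler_pos st tp
    have hcw := pv_countWords_append ps (pvFiller st tp)
    set t : Int := (pvCountWords ps : Int) with ht
    have hcw' : (pvCountWords (ps ++ [pvFiller st tp]) : Int) = t + fw := by push_cast [hcw]; ring
    rw [hcw']
    have hsub : PySem.Int.floordiv (t - wc) fw = PySem.Int.floordiv (t + fw - wc) fw - 1 := by
      have := pv_floordiv_sub_self (a := t + fw - wc) hfwpos
      rw [show t + fw - wc - fw = t - wc by ring] at this
      omega
    by_cases h2 : t + fw < wc
    · simp only [h2, if_true]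
      have hneg : PySem.Int.floordiv (t + fw - wc) fw < 0 := by
        rw [PySem.Int.floordiv_lt_iff_lt_mul hfwpos]
        omega
      rw [List.append_assoc]
      congr 1
      rw [show (-(PySem.Int.floordiv (t - wc) fw)).toNat = (-(PySem.Int.floordiv (t + fw - wc) fw)).toNat + 1 by omega]
      rfl
    · simp only [h2, if_false]
      have hq : PySem.Int.floordiv (t - wc) fw = -1 := by
        refine (PySem.Int.floordiv_eq_iff_of_pos hfwpos).mpr ⟨?_, ?_⟩ <;> nlinarith
      rw [hq]
      rfl

-- the two ports, with paragraph maker g and point list abstracted, produce the same string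
theorem pv_main_aux (wc : Int) (st tp : List Char) (g : List Char → List Char) (points : List (List Char)) :
    String.ofList (PySem.Chars.join pvNN (pvFillLoop wc st tp (points.foldl (fun ps point => ps ++ [g point]) []))) =
    String.ofList (PySem.Chars.join pvNN (
      let acc := points.foldl (fun acc point => (acc.1 ++ [g point], acc.2 + ((PySem.Chars.split₀ (g point)).length : Int))) ([], 0)
      if acc.2 < wc then acc.1 ++ List.replicate (-(PySem.Int.floordiv (acc.2 - wc) ((PySem.Chars.split₀ (pvFiller st tp)).length : Int))).toNat (pvFiller st tp) else acc.1)) := by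
  rw [pv_fold_pair g points [] 0, pv_fillLoop_eq]
  have h0 : pvCountWords ([] : List (List Char)) = 0 := rfl
  simp [h0]

-- ===== VERDICT (by name: the statement is the Claim_ definition above) =====
theorem generate_default_section_content_py_spec : Claim_equal_generate_default_section_content_py := by
  intro section_title key_points word_count topic _
  show generate_default_section_content_py section_title key_points word_count topic
      = generate_default_section_content_py_alt section_title key_points word_count topic
  exact pv_main_aux word_count section_title.toList topic.toList
    (fun point =>
      let p := pvPara section_title.toList topic.toList point
      if ((PySem.Chars.split₀ p).length : Int) < (max 3 (PySem.Int.floordiv word_count 120)) * 20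
        then p ++ pvExtra point else p)
    (if key_points.isEmpty then ["Core aspect of ".toList ++ topic.toList] else key_points.map String.toList)
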